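-- pv_equiv track=rewrite | github.com/miliar/Code_Jam_Webscraper | solutions_python/Problem_45/66.py | sCells
-- ===== SOURCE A (Python) =====
-- def bCell(cell, p):
--     if p==cell[0] and p==cell[1]:
--         return []
--     elif p==cell[0]:
--         return [(p+1, cell[1])]
--     elif p==cell[1]:
--         return [(cell[0], p-1)]
--     return [(cell[0], p-1), (p+1, cell[1])]
--
-- def sCells(cell, ps):
--     sum_m = 0
--     cs = [cell]
--     for s in ps:
--         tc = None
--         for cc in cs:
--             if cc[0]<=s and cc[1]>=s:
--                 tc = cc
--                 break
--         if tc is not None: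
--             cs.remove(tc)
--             bs = bCell(tc, s)
--             cs.extend(bs)
--             for bbs in bs:
--                 sum_m = sum_m + (bbs[1]-bbs[0]+1)
--     return sum_m
-- ===== SOURCE B (Python) =====
-- def _bisect_left(xs, v):
--     lo, hi = 0, len(xs)
--     while lo < hi:
--         mid = (lo + hi) // 2
--         if xs[mid] < v:
--             lo = mid + 1
--         else:
--             hi = mid
--     return lo
--
-- def sCells(cell, ps):
--     lo, hi = cell[0], cell[1]
--     cuts = []          # sorted list of split points already applied
--     total = 0
--     for s in ps:
--         if s < lo or s > hi:
--             continue
--         i = _bisect_left(cuts, s)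
--         if i < len(cuts) and cuts[i] == s:
--             continue
--         a = cuts[i - 1] + 1 if i > 0 else lo
--         b = cuts[i] - 1 if i < len(cuts) else hi
--         total += b - a
--         cuts.insert(i, s)
--     return total
-- ===== Notes on version B (the rewrite author's own statement) =====
-- stated objective: alternative
-- what changed: Instead of A's list of intervals scanned linearly (and list.remove-ed) for each query, B keeps only the sorted list of effective split points, finds the containing interval's bounds by binary search (predecessor/successor cut), and adds its size minus one directly.
-- outside the precondition, e.g. on sCells((5,), []): A returns 0, B raises IndexError
import Mathlib
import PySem

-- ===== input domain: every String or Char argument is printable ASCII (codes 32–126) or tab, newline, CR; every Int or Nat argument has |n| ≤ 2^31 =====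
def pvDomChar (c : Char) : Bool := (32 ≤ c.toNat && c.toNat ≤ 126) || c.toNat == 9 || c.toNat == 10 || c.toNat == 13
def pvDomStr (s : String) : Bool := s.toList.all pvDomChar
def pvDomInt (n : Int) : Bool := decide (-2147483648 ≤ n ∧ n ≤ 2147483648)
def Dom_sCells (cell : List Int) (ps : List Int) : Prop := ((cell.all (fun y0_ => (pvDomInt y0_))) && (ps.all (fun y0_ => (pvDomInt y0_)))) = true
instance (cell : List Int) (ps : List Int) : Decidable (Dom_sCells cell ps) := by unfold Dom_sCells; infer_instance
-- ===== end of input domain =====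

-- B replaces A's per-query linear scan over a list of intervals by a binary search in the
-- sorted list of effective split points: a different algorithm and data structure.

-- ===== PORT A =====
-- A's cs holds intervals; only elements 0 and 1 of the initial `cell` list are ever read,
-- so intervals are ported as pairs (exact for cells of length ≥ 2, i.e. under Pre_).
def bCellA (c : Int × Int) (p : Int) : List (Int × Int) :=
  if p = c.1 ∧ p = c.2 then []
  else if p = c.1 then [(p + 1, c.2)]
  else if p = c.2 then [(c.1, p - 1)]
  else [(c.1, p - 1), (p + 1, c.2)]

def sCellsStepA (st : Int × List (Int × Int)) (s : Int) : Int × List (Int × Int) :=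
  match st.2.find? (fun cc => decide (cc.1 ≤ s ∧ s ≤ cc.2)) with
  | none => st
  | some tc =>
    let bs := bCellA tc s
    (bs.foldl (fun acc b => acc + (b.2 - b.1 + 1)) st.1,
     -- cs.remove(tc): tc came from cs, so remove? succeeds; getD is for totality only
     ((PySem.List.remove? st.2 tc).getD st.2) ++ bs)

def sCells (cell : List Int) (ps : List Int) : Int :=
  (ps.foldl sCellsStepA
    (0, [((PySem.List.pyGet? cell 0).getD 0, (PySem.List.pyGet? cell 1).getD 0)])).1

-- ===== PORT B =====
-- hand-written _bisect_left of Source B; indices stay in range, List.getD is exact there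
-- the while-loop of _bisect_left; `fuel` only bounds the iteration count (hi - lo shrinks
-- every turn, so fuel = initial hi - lo is enough) and keeps the recursion structural
def pvBisectGo (xs : List Int) (v : Int) : Nat → Nat → Nat → Nat
  | 0, lo, _ => lo
  | fuel + 1, lo, hi =>
    if lo < hi then
      let mid := (lo + hi) / 2
      if xs.getD mid 0 < v then pvBisectGo xs v fuel (mid + 1) hi
      else pvBisectGo xs v fuel lo mid
    else lo

def pvBisectLeft (xs : List Int) (v : Int) : Nat := pvBisectGo xs v xs.length 0 xs.length

def sCellsStepB (lo hi : Int) (st : Int × List Int) (s : Int) : Int × List Int :=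
  if s < lo ∨ hi < s then st
  else
    let i := pvBisectLeft st.2 s
    if i < st.2.length ∧ st.2.getD i 0 = s then st
    else
      let a := if 0 < i then st.2.getD (i - 1) 0 + 1 else lo
      let b := if i < st.2.length then st.2.getD i 0 - 1 else hi
      (st.1 + (b - a), PySem.List.insert st.2 (i : Int) s)

def sCells_alt (cell : List Int) (ps : List Int) : Int :=
  let lo := (PySem.List.pyGet? cell 0).getD 0
  let hi := (PySem.List.pyGet? cell 1).getD 0
  (ps.foldl (sCellsStepB lo hi) (0, [])).1

-- ===== PRECONDITION & SPEC =====
-- Pre_ excludes cells with fewer than two endpoints: there A raises IndexError whenever ps is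
-- non-empty and only accidentally returns 0 when ps is empty, while B reads both endpoints up
-- front and raises.
def Pre_sCells (cell : List Int) (ps : List Int) : Prop := 2 ≤ cell.length
instance (cell : List Int) (ps : List Int) : Decidable (Pre_sCells cell ps) := by
  unfold Pre_sCells; infer_instance
def pvWitness_sCells : List Int × List Int := ([0, 5], [2])

def Spec_sCells (cell : List Int) (ps : List Int) (out : Int) : Prop := out = sCells_alt cell ps
instance (cell : List Int) (ps : List Int) (out : Int) : Decidable (Spec_sCells cell ps out) := by
  unfold Spec_sCells; infer_instance

-- ===== CLAIM (what is proved, stated in full; the proofs are below) =====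
def Claim_equal_sCells : Prop := ∀ (cell : List Int) (ps : List Int), Dom_sCells cell ps → Pre_sCells cell ps → Spec_sCells cell ps (sCells cell ps)

-- ===== LEMMAS AND PROOFS =====

-- `cuts` is a valid set of split points for the initial interval [lo, hi]
def Cuts (lo hi : Int) (cuts : List Int) : Prop :=
  cuts.Pairwise (· < ·) ∧ ∀ c ∈ cuts, lo ≤ c ∧ c ≤ hi

-- the maximal uncut runs of [lo, hi] determined by the sorted cut list
def Runs (lo hi : Int) : List Int → List (Int × Int)
  | [] => if lo ≤ hi then [(lo, hi)] else []
  | c :: cs => (if lo ≤ c - 1 then [(lo, c - 1)] else []) ++ Runs (c + 1) hi cs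

-- bounds of the run containing s (s inside [lo,hi], not a cut)
def cutLo (lo : Int) : List Int → Int → Int
  | [], _ => lo
  | c :: cs, s => if c < s then cutLo (c + 1) cs s else lo

def cutHi (hi : Int) : List Int → Int → Int
  | [], _ => hi
  | c :: cs, s => if c < s then cutHi hi cs s else c - 1

def sinsert (s : Int) : List Int → List Int
  | [] => [s]
  | c :: cs => if c < s then c :: sinsert s cs else s :: c :: cs

theorem cuts_cons {lo hi c : Int} {cs : List Int} (h : Cuts lo hi (c :: cs)) :
    Cuts (c + 1) hi cs := by
  obtain ⟨hpw, hbd⟩ := h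
  refine ⟨hpw.of_cons, fun x hx => ?_⟩
  have := List.rel_of_pairwise_cons hpw hx
  have := hbd x (List.mem_cons_of_mem _ hx)
  omega

theorem runs_bounds {cuts : List Int} : ∀ {lo hi : Int}, Cuts lo hi cuts →
    ∀ r ∈ Runs lo hi cuts, lo ≤ r.1 ∧ r.1 ≤ r.2 ∧ r.2 ≤ hi := by
  induction cuts with
  | nil =>
    intro lo hi _ r hr
    by_cases h : lo ≤ hi <;> simp [Runs, h] at hr
    simp [hr]; omega
  | cons c cs ih =>
    intro lo hi hc r hr
    have hbd := hc.2 c (List.mem_cons_self)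
    rw [Runs, List.mem_append] at hr
    rcases hr with hr | hr
    · by_cases h : lo ≤ c - 1 <;> simp [h] at hr
      simp [hr]; omega
    · have := ih (cuts_cons hc) r hr
      omega

theorem cutLo_le {cuts : List Int} : ∀ {lo hi s : Int}, Cuts lo hi cuts →
    lo ≤ cutLo lo cuts s := by
  induction cuts with
  | nil => intro lo hi s _; simp [cutLo]
  | cons c cs ih =>
    intro lo hi s hc
    have hbd := hc.2 c (List.mem_cons_self)
    rw [cutLo]
    split
    · have := ih (hi := hi) (s := s) (cuts_cons hc); omega
    · omega

theorem cut_mem_runs {cuts : List Int} : ∀ {lo hi s : Int}, Cuts lo hi cuts →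
    lo ≤ s → s ≤ hi → s ∉ cuts →
    cutLo lo cuts s ≤ s ∧ s ≤ cutHi hi cuts s ∧
      (cutLo lo cuts s, cutHi hi cuts s) ∈ Runs lo hi cuts := by
  induction cuts with
  | nil =>
    intro lo hi s _ h1 h2 _
    refine ⟨by simpa [cutLo] using h1, by simpa [cutHi] using h2, ?_⟩
    have : lo ≤ hi := le_trans h1 h2
    simp [Runs, cutLo, cutHi, this]
  | cons c cs ih =>
    intro lo hi s hc h1 h2 hs
    have hne : s ≠ c := fun h => hs (h ▸ List.mem_cons_self)
    have hs' : s ∉ cs := fun h => hs (List.mem_cons_of_mem _ h)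
    by_cases hlt : c < s
    · have := ih (cuts_cons hc) (by omega) h2 hs'
      rw [cutLo, cutHi, Runs]
      simp only [hlt, if_true]
      exact ⟨this.1, this.2.1, List.mem_append_right _ this.2.2⟩
    · have hsc : s < c := by omega
      rw [cutLo, cutHi, Runs]
      simp only [hlt, if_false]
      refine ⟨h1, by omega, ?_⟩
      have : lo ≤ c - 1 := by omega
      simp [this]

theorem runs_unique {cuts : List Int} : ∀ {lo hi s : Int}, Cuts lo hi cuts → s ∉ cuts →
    ∀ r ∈ Runs lo hi cuts, r.1 ≤ s → s ≤ r.2 →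
      r = (cutLo lo cuts s, cutHi hi cuts s) := by
  induction cuts with
  | nil =>
    intro lo hi s _ _ r hr _ _
    by_cases h : lo ≤ hi <;> simp [Runs, h] at hr
    simp [hr, cutLo, cutHi]
  | cons c cs ih =>
    intro lo hi s hc hs r hr hr1 hr2
    have hne : s ≠ c := fun h => hs (h ▸ List.mem_cons_self)
    have hs' : s ∉ cs := fun h => hs (List.mem_cons_of_mem _ h)
    rw [Runs, List.mem_append] at hr
    rcases hr with hr | hr
    · by_cases h : lo ≤ c - 1 <;> simp [h] at hr
      have hsc : ¬ c < s := by rw [hr] at hr2; simp at hr2; omega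
      rw [cutLo, cutHi]; simp [hsc, hr]
    · have hb := runs_bounds (cuts_cons hc) r hr
      have hcs : c < s := by omega
      rw [cutLo, cutHi]
      simp only [hcs, if_true]
      exact ih (cuts_cons hc) hs' r hr hr1 hr2

theorem runs_none {cuts : List Int} : ∀ {lo hi s : Int}, Cuts lo hi cuts →
    s ∈ cuts → ∀ r ∈ Runs lo hi cuts, ¬ (r.1 ≤ s ∧ s ≤ r.2) := by
  induction cuts with
  | nil => intro lo hi s _ h; simp at h
  | cons c cs ih =>
    intro lo hi s hc hs r hr
    rw [Runs, List.mem_append] at hr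
    have hcle : c ≤ s := by
      rcases List.mem_cons.mp hs with h | h
      · omega
      · have := List.rel_of_pairwise_cons hc.1 h; omega
    rcases hr with hr | hr
    · by_cases h : lo ≤ c - 1 <;> simp [h] at hr
      simp [hr]; omega
    · rcases List.mem_cons.mp hs with h | h
      · have hb := runs_bounds (cuts_cons hc) r hr
        subst h; omega
      · exact ih (cuts_cons hc) h r hr

-- splitting the run containing s: the new runs are the broken pieces plus the old runs minus it
theorem runs_split {cuts : List Int} : ∀ {lo hi s : Int}, Cuts lo hi cuts →
    lo ≤ s → s ≤ hi → s ∉ cuts →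
    (Runs lo hi (sinsert s cuts)).Perm
      (bCellA (cutLo lo cuts s, cutHi hi cuts s) s ++
        (Runs lo hi cuts).erase (cutLo lo cuts s, cutHi hi cuts s)) := by
  induction cuts with
  | nil =>
    intro lo hi s _ h1 h2 _
    have hlh : lo ≤ hi := le_trans h1 h2
    rw [show sinsert s [] = [s] from rfl, Runs, Runs]
    simp only [cutLo, cutHi, Runs, if_pos hlh, List.erase_cons_head, List.append_nil]
    unfold bCellA
    by_cases e1 : s = lo <;> by_cases e2 : s = hi
    · subst e1; subst e2
      simp [show ¬ (s : Int) ≤ s - 1 by omega, show ¬ s + 1 ≤ s by omega, Runs]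
    · subst e1
      simp [show ¬ (s : Int) ≤ s - 1 by omega, show (s : Int) + 1 ≤ hi by omega, Runs, e2]
    · subst e2
      simp [show lo ≤ (s : Int) - 1 by omega, show ¬ (s : Int) + 1 ≤ s by omega, Runs, e1]
    · simp [show lo ≤ (s : Int) - 1 by omega, show (s : Int) + 1 ≤ hi by omega, Runs, e1, e2]
  | cons c cs ih =>
    intro lo hi s hc h1 h2 hs
    have hne : s ≠ c := fun h => hs (h ▸ List.mem_cons_self)
    have hs' : s ∉ cs := fun h => hs (List.mem_cons_of_mem _ h)
    by_cases hlt : c < s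
    · -- s splits a run to the right of c
      have hc' := cuts_cons hc
      have hIH := ih hc' (by omega) h2 hs'
      have hlo : c + 1 ≤ cutLo (c + 1) cs s := cutLo_le (hi := hi) (s := s) hc'
      rw [show sinsert s (c :: cs) = c :: sinsert s cs by rw [sinsert]; simp [hlt], Runs, Runs]
      rw [show cutLo lo (c :: cs) s = cutLo (c + 1) cs s by rw [cutLo]; simp [hlt]]
      rw [show cutHi hi (c :: cs) s = cutHi hi cs s by rw [cutHi]; simp [hlt]]
      set r : Int × Int := (cutLo (c + 1) cs s, cutHi hi cs s) with hr
      set fp : List (Int × Int) := if lo ≤ c - 1 then [(lo, c - 1)] else [] with hfp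
      have hrfp : r ∉ fp := by
        intro hmem
        have hb := hc.2 c List.mem_cons_self
        by_cases h : lo ≤ c - 1 <;> simp [hfp, h] at hmem
        have : r.1 = lo := by rw [hmem]
        simp [hr] at this; omega
      rw [List.erase_append_right _ hrfp]
      refine (hIH.append_left fp).trans ?_
      have hcomm : (fp ++ bCellA r s).Perm (bCellA r s ++ fp) := List.perm_append_comm
      simpa [List.append_assoc] using hcomm.append_right ((Runs (c + 1) hi cs).erase r)
    · -- s falls in the first run (lo, c-1)
      have hsc : s < c := by omega
      rw [show sinsert s (c :: cs) = s :: c :: cs by rw [sinsert]; simp [hlt]]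
      rw [show cutLo lo (c :: cs) s = lo by rw [cutLo]; simp [hlt]]
      rw [show cutHi hi (c :: cs) s = c - 1 by rw [cutHi]; simp [hlt]]
      have hfirst : lo ≤ c - 1 := by omega
      rw [Runs, Runs, Runs]
      simp only [if_pos hfirst]
      rw [List.singleton_append, List.erase_cons_head]
      unfold bCellA
      by_cases e1 : s = lo <;> by_cases e2 : s = c - 1
      · simp [e1, e2, show ¬ lo ≤ s - 1 by omega, show ¬ s + 1 ≤ c - 1 by omega]
        all_goals split_ifs <;> first | exact List.Perm.refl _ | omega
      · simp [e1, e2, show ¬ lo ≤ s - 1 by omega, show s + 1 ≤ c - 1 by omega]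
        all_goals split_ifs <;> first | exact List.Perm.refl _ | omega
      · simp [e1, e2, show lo ≤ s - 1 by omega, show ¬ s + 1 ≤ c - 1 by omega]
        all_goals split_ifs <;> first | exact List.Perm.refl _ | omega
      · simp [e1, e2, show lo ≤ s - 1 by omega, show s + 1 ≤ c - 1 by omega]
        all_goals split_ifs <;> first | exact List.Perm.refl _ | omega

theorem bCellA_sum {a b s t : Int} (h1 : a ≤ s) (h2 : s ≤ b) :
    (bCellA (a, b) s).foldl (fun acc p => acc + (p.2 - p.1 + 1)) t = t + (b - a) := by
  unfold bCellA
  split_ifs with h3 h4 h5 <;> simp_all <;> omega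

theorem find?_eq_some_of_unique {α : Type} (p : α → Bool) (l : List α) (r : α)
    (hr : r ∈ l) (hp : p r = true) (huniq : ∀ x ∈ l, p x = true → x = r) :
    l.find? p = some r := by
  induction l with
  | nil => simp at hr
  | cons a l ih =>
    by_cases h : p a = true
    · have : a = r := huniq a List.mem_cons_self h
      subst this; simp [List.find?, h]
    · have hra : r ≠ a := fun e => h (e ▸ hp)
      rw [List.find?]
      simp only [h]
      exact ih (by rcases List.mem_cons.mp hr with e | e; exact absurd e.symm (Ne.symm hra); exact e)
        (fun x hx hpx => huniq x (List.mem_cons_of_mem _ hx) hpx)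

-- ===== binary search lemmas =====

theorem sorted_get_lt_iff {cuts : List Int} (hpw : cuts.Pairwise (· < ·)) (s : Int) :
    ∀ j (hj : j < cuts.length),
      (cuts[j] < s ↔ j < cuts.countP (fun c => decide (c < s))) := by
  induction cuts with
  | nil => intro j hj; simp at hj
  | cons c cs ih =>
    intro j hj
    rw [List.countP_cons]
    by_cases h : c < s
    · simp only [h, decide_true, if_true]
      cases j with
      | zero => simpa using by omega
      | succ j =>
        have := ih hpw.of_cons j (by simpa using hj)
        simpa using by omega
    · have hz : cs.countP (fun c => decide (c < s)) = 0 := by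
        apply List.countP_eq_zero.mpr
        intro x hx
        have := List.rel_of_pairwise_cons hpw hx
        simp; omega
      simp only [h, decide_false, if_false, hz]
      cases j with
      | zero => simpa using by omega
      | succ j =>
        have hjl : j < cs.length := by simpa using hj
        have hx : cs[j] ∈ cs := List.getElem_mem hjl
        have := List.rel_of_pairwise_cons hpw hx
        simpa using by omega

theorem pvBisectGo_eq {cuts : List Int} (hpw : cuts.Pairwise (· < ·)) (s : Int) :
    ∀ n lo hi, hi - lo ≤ n → lo ≤ cuts.countP (fun c => decide (c < s)) →
      cuts.countP (fun c => decide (c < s)) ≤ hi → hi ≤ cuts.length →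
      pvBisectGo cuts s n lo hi = cuts.countP (fun c => decide (c < s)) := by
  intro n
  induction n with
  | zero =>
    intro lo hi hn h1 h2 h3
    rw [pvBisectGo]
    omega
  | succ n ih =>
    intro lo hi hn h1 h2 h3
    rw [pvBisectGo]
    by_cases hlh : lo < hi
    · simp only [hlh, if_true]
      have hmid1 : lo ≤ (lo + hi) / 2 := by omega
      have hmid2 : (lo + hi) / 2 < hi := by omega
      have hml : (lo + hi) / 2 < cuts.length := by omega
      have hget : cuts.getD ((lo + hi) / 2) 0 = cuts[(lo + hi) / 2] :=
        List.getD_eq_getElem _ _ hml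
      have hiff := sorted_get_lt_iff hpw s ((lo + hi) / 2) hml
      by_cases hm : cuts.getD ((lo + hi) / 2) 0 < s
      · simp only [hm, if_true]
        rw [hget] at hm
        have := hiff.mp hm
        exact ih ((lo + hi) / 2 + 1) hi (by omega) (by omega) h2 h3
      · simp only [hm, if_false]
        rw [hget] at hm
        have : ¬ ((lo + hi) / 2 < cuts.countP (fun c => decide (c < s))) := fun h => hm (hiff.mpr h)
        exact ih lo ((lo + hi) / 2) (by omega) h1 (by omega) (by omega)
    · simp only [hlh, if_false]; omega

theorem pvBisectLeft_eq {cuts : List Int} (hpw : cuts.Pairwise (· < ·)) (s : Int) :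
    pvBisectLeft cuts s = cuts.countP (fun c => decide (c < s)) := by
  unfold pvBisectLeft
  exact pvBisectGo_eq hpw s cuts.length 0 cuts.length (by omega) (by omega)
    (List.countP_le_length) (le_refl _)

theorem mem_iff_getD_countP {cuts : List Int} (hpw : cuts.Pairwise (· < ·)) (s : Int) :
    s ∈ cuts ↔ (cuts.countP (fun c => decide (c < s)) < cuts.length ∧
      cuts.getD (cuts.countP (fun c => decide (c < s))) 0 = s) := by
  induction cuts with
  | nil => simp
  | cons c cs ih =>
    rw [List.countP_cons]
    by_cases h : c < s
    · have hne : s ≠ c := by omega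
      simp only [h, decide_true, if_true]
      rw [List.mem_cons]
      constructor
      · rintro (e | hm)
        · exact absurd e hne
        · have := (ih hpw.of_cons).mp hm
          refine ⟨?_, ?_⟩
          · simp only [List.length_cons]
            omega
          · simp only [List.getD_cons_succ]
            exact this.2
      · rintro ⟨hl, he⟩
        right
        apply (ih hpw.of_cons).mpr
        simp only [List.length_cons] at hl
        simp only [List.getD_cons_succ] at he
        exact ⟨by omega, he⟩
    · have hz : cs.countP (fun c => decide (c < s)) = 0 := by
        apply List.countP_eq_zero.mpr
        intro x hx
        have := List.rel_of_pairwise_cons hpw hx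
        simp; omega
      simp only [h, decide_false, if_false, hz]
      rw [List.mem_cons]
      constructor
      · rintro (e | hm)
        · subst e; simp
        · have := List.rel_of_pairwise_cons hpw hm; omega
      · rintro ⟨_, he⟩
        left
        simpa using he.symm

theorem cut_eq_getD {cuts : List Int} (hpw : cuts.Pairwise (· < ·)) {s : Int}
    (hs : s ∉ cuts) : ∀ (lo hi : Int),
    cutLo lo cuts s = (if 0 < cuts.countP (fun c => decide (c < s)) then
        cuts.getD (cuts.countP (fun c => decide (c < s)) - 1) 0 + 1 else lo) ∧
    cutHi hi cuts s = (if cuts.countP (fun c => decide (c < s)) < cuts.length then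
        cuts.getD (cuts.countP (fun c => decide (c < s))) 0 - 1 else hi) := by
  induction cuts with
  | nil => intro lo hi; simp [cutLo, cutHi]
  | cons c cs ih =>
    intro lo hi
    have hs' : s ∉ cs := fun h => hs (List.mem_cons_of_mem _ h)
    rw [List.countP_cons, cutLo, cutHi]
    by_cases h : c < s
    · simp only [h, if_true, decide_true]
      obtain ⟨ha, hb⟩ := ih hpw.of_cons hs' (c + 1) hi
      constructor
      · rw [ha]
        rcases Nat.eq_zero_or_pos (cs.countP (fun c => decide (c < s))) with hz | hpos
        · simp [hz]
        · have h1 : (0:Nat) < cs.countP (fun c => decide (c < s)) + 1 := by omega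
          simp only [if_pos hpos, if_pos h1, Nat.add_sub_cancel]
          obtain ⟨k, hk⟩ : ∃ k, cs.countP (fun c => decide (c < s)) = k + 1 :=
            ⟨_, (Nat.succ_pred_eq_of_pos hpos).symm⟩
          rw [hk]
          simp
      · rw [hb]
        simp only [List.length_cons, Nat.add_lt_add_iff_right, List.getD_cons_succ]
    · have hz : cs.countP (fun c => decide (c < s)) = 0 := by
        apply List.countP_eq_zero.mpr
        intro x hx
        have := List.rel_of_pairwise_cons hpw hx
        simp; omega
      simp only [h, if_false, decide_false, hz]
      simp

theorem insert_eq_sinsert {cuts : List Int} (hpw : cuts.Pairwise (· < ·)) (s : Int) :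
    PySem.List.insert cuts ((cuts.countP (fun c => decide (c < s)) : Nat) : Int) s =
      sinsert s cuts := by
  rw [PySem.List.insert_natCast cuts _ s List.countP_le_length]
  induction cuts with
  | nil => simp [sinsert]
  | cons c cs ih =>
    rw [List.countP_cons, sinsert]
    by_cases h : c < s
    · simp only [h, if_true, decide_true]
      rw [List.take_succ_cons, List.drop_succ_cons, List.cons_append]
      rw [ih hpw.of_cons]
    · have hz : cs.countP (fun c => decide (c < s)) = 0 := by
        apply List.countP_eq_zero.mpr
        intro x hx
        have := List.rel_of_pairwise_cons hpw hx
        simp; omega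
      simp [h, hz]

theorem mem_sinsert {s x : Int} : ∀ {cuts : List Int}, x ∈ sinsert s cuts ↔ x = s ∨ x ∈ cuts := by
  intro cuts
  induction cuts with
  | nil => simp [sinsert]
  | cons c cs ih =>
    rw [sinsert]
    by_cases h : c < s <;> simp [h, ih] <;> tauto

theorem cuts_sinsert {lo hi s : Int} {cuts : List Int} (hc : Cuts lo hi cuts)
    (h1 : lo ≤ s) (h2 : s ≤ hi) (hs : s ∉ cuts) : Cuts lo hi (sinsert s cuts) := by
  induction cuts with
  | nil =>
    refine ⟨by simp [sinsert], ?_⟩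
    intro x hx
    simp [sinsert] at hx
    omega
  | cons c cs ih =>
    obtain ⟨hpw, hbd⟩ := hc
    have hs' : s ∉ cs := fun h => hs (List.mem_cons_of_mem _ h)
    have hne : s ≠ c := fun h => hs (h ▸ List.mem_cons_self)
    by_cases h : c < s
    · have ihr := ih ⟨hpw.of_cons, fun x hx => hbd x (List.mem_cons_of_mem _ hx)⟩ hs'
      rw [sinsert, if_pos h]
      refine ⟨List.pairwise_cons.mpr ⟨?_, ihr.1⟩, ?_⟩
      · intro x hx
        rcases mem_sinsert.mp hx with e | e
        · omega
        · exact List.rel_of_pairwise_cons hpw e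
      · intro x hx
        rcases List.mem_cons.mp hx with e | e
        · exact e ▸ hbd c List.mem_cons_self
        · rcases mem_sinsert.mp e with e' | e'
          · omega
          · exact hbd x (List.mem_cons_of_mem _ e')
    · have hsc : s < c := by omega
      rw [sinsert, if_neg h]
      refine ⟨List.pairwise_cons.mpr ⟨?_, hpw⟩, ?_⟩
      · intro x hx
        rcases List.mem_cons.mp hx with e | e
        · omega
        · have := List.rel_of_pairwise_cons hpw e; omega
      · intro x hx
        rcases List.mem_cons.mp hx with e | e
        · omega
        · exact hbd x e

-- ===== main invariant =====

def RelAB (lo hi : Int) (stA : Int × List (Int × Int)) (stB : Int × List Int) : Prop :=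
  stA.1 = stB.1 ∧ Cuts lo hi stB.2 ∧ stA.2.Perm (Runs lo hi stB.2)

theorem step_rel {lo hi : Int} {stA : Int × List (Int × Int)} {stB : Int × List Int}
    (h : RelAB lo hi stA stB) (s : Int) :
    RelAB lo hi (sCellsStepA stA s) (sCellsStepB lo hi stB s) := by
  obtain ⟨hsum, hc, hperm⟩ := h
  by_cases hrange : s < lo ∨ hi < s
  · -- out of range: both steps skip
    have hfind : stA.2.find? (fun cc => decide (cc.1 ≤ s ∧ s ≤ cc.2)) = none := by
      apply List.find?_eq_none.mpr
      intro r hr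
      have hb := runs_bounds hc r (hperm.subset hr)
      simp only [decide_eq_true_eq]
      omega
    rw [show sCellsStepA stA s = stA by rw [sCellsStepA, hfind]]
    rw [show sCellsStepB lo hi stB s = stB by rw [sCellsStepB, if_pos hrange]]
    exact ⟨hsum, hc, hperm⟩
  · have h1 : lo ≤ s := by omega
    have h2 : s ≤ hi := by omega
    have hbis := pvBisectLeft_eq hc.1 s
    by_cases hmem : s ∈ stB.2
    · -- s already a cut: both steps skip
      have hfind : stA.2.find? (fun cc => decide (cc.1 ≤ s ∧ s ≤ cc.2)) = none := by
        apply List.find?_eq_none.mpr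
        intro r hr
        have := runs_none hc hmem r (hperm.subset hr)
        simp only [decide_eq_true_eq]
        exact this
      rw [show sCellsStepA stA s = stA by rw [sCellsStepA, hfind]]
      have hcond := (mem_iff_getD_countP hc.1 s).mp hmem
      rw [show sCellsStepB lo hi stB s = stB by
        rw [sCellsStepB, if_neg hrange]
        simp only [hbis]
        rw [if_pos hcond]]
      exact ⟨hsum, hc, hperm⟩
    · -- s splits the run containing it
      have hcm := cut_mem_runs hc h1 h2 hmem
      set a := cutLo lo stB.2 s with ha
      set b := cutHi hi stB.2 s with hb
      have hrcs : (a, b) ∈ stA.2 := hperm.mem_iff.mpr hcm.2.2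
      have hfind : stA.2.find? (fun cc => decide (cc.1 ≤ s ∧ s ≤ cc.2)) = some (a, b) := by
        apply find?_eq_some_of_unique _ _ _ hrcs
        · simp only [decide_eq_true_eq]
          exact ⟨hcm.1, hcm.2.1⟩
        · intro x hx hpx
          simp only [decide_eq_true_eq] at hpx
          exact runs_unique hc hmem x (hperm.subset hx) hpx.1 hpx.2
      have hrem : (PySem.List.remove? stA.2 (a, b)).getD stA.2 = stA.2.erase (a, b) := by
        rw [PySem.List.remove?_eq_some_erase _ _ hrcs]; rfl
      have hAstep : sCellsStepA stA s =
          (stA.1 + (b - a), stA.2.erase (a, b) ++ bCellA (a, b) s) := by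
        rw [sCellsStepA, hfind]
        simp only [hrem]
        rw [bCellA_sum hcm.1 hcm.2.1]
      have hgd := cut_eq_getD hc.1 hmem lo hi
      have hcond : ¬ (stB.2.countP (fun c => decide (c < s)) < stB.2.length ∧
          stB.2.getD (stB.2.countP (fun c => decide (c < s))) 0 = s) :=
        fun hcontra => hmem ((mem_iff_getD_countP hc.1 s).mpr hcontra)
      have hBstep : sCellsStepB lo hi stB s = (stB.1 + (b - a), sinsert s stB.2) := by
        rw [sCellsStepB, if_neg hrange]
        simp only [hbis]
        rw [if_neg hcond]
        rw [← insert_eq_sinsert hc.1 s]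
        rw [ha, hb, hgd.1, hgd.2]
      rw [hAstep, hBstep]
      refine ⟨by rw [hsum], cuts_sinsert hc h1 h2 hmem, ?_⟩
      have e1 : (stA.2.erase (a, b)).Perm ((Runs lo hi stB.2).erase (a, b)) := hperm.erase _
      have e2 := runs_split hc h1 h2 hmem
      rw [← ha, ← hb] at e2
      exact ((e1.append (List.Perm.refl (bCellA (a, b) s))).trans List.perm_append_comm).trans
        e2.symm

theorem fold_rel {lo hi : Int} (ps : List Int) :
    ∀ {stA : Int × List (Int × Int)} {stB : Int × List Int}, RelAB lo hi stA stB →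
      (ps.foldl sCellsStepA stA).1 = (ps.foldl (sCellsStepB lo hi) stB).1 := by
  induction ps with
  | nil => intro stA stB h; exact h.1
  | cons s ps ih => intro stA stB h; exact ih (step_rel h s)

theorem fold_degenerate {lo hi : Int} (hlh : hi < lo) (ps : List Int) :
    ∀ (t : Int), (ps.foldl sCellsStepA (t, [(lo, hi)])).1 = t ∧
      (ps.foldl (sCellsStepB lo hi) (t, [])).1 = t := by
  induction ps with
  | nil => intro t; exact ⟨rfl, rfl⟩
  | cons s ps ih =>
    intro t
    have hA : sCellsStepA (t, [(lo, hi)]) s = (t, [(lo, hi)]) := by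
      rw [sCellsStepA]
      have : ¬ (lo ≤ s ∧ s ≤ hi) := by omega
      simp [List.find?, this]
    have hB : sCellsStepB lo hi (t, []) s = (t, []) := by
      rw [sCellsStepB, if_pos (by omega : s < lo ∨ hi < s)]
    rw [List.foldl_cons, List.foldl_cons, hA, hB]
    exact ih t

-- ===== VERDICT (by name: the statement is the Claim_ definition above) =====
theorem sCells_spec : Claim_equal_sCells := by
  intro cell ps _ _
  unfold Spec_sCells sCells sCells_alt
  set lo := (PySem.List.pyGet? cell 0).getD 0 with hlo
  set hi := (PySem.List.pyGet? cell 1).getD 0 with hhi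
  by_cases h : lo ≤ hi
  · apply fold_rel
    refine ⟨rfl, ⟨by simp, by simp⟩, ?_⟩
    simp [Runs, h]
  · have := fold_degenerate (by omega : hi < lo) ps 0
    rw [this.1, this.2]
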